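-- pv_equiv track=rewrite | github.com/NGnius/streamq | src/main/tools/codes.py | code2id
-- ===== SOURCE A (Python) =====
-- READABLE_CHARS = [
--     'A', 'B', 'C', 'D', 'E', 'F', 'G', 'H', 'I', 'J', 'K', 'L', 'M', 'N', 'O', 'P', 'Q', 'R', 'S', 'T', 'U', 'V', 'W', 'X', 'Y', 'Z', '1', '2', '3', '4', '5', '6', '7', '8', '9'
--     ]
--
-- def code2id(code):
--     pos = 0
--     result = 0
--     radix = len(READABLE_CHARS)
--     code = code.upper()
--     for c in code:
--         result += (radix**pos)*READABLE_CHARS.index(c)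
--         pos += 1
--     return result
-- ===== SOURCE B (Python) =====
-- READABLE_CHARS = [
--     'A', 'B', 'C', 'D', 'E', 'F', 'G', 'H', 'I', 'J', 'K', 'L', 'M', 'N', 'O', 'P', 'Q', 'R', 'S', 'T', 'U', 'V', 'W', 'X', 'Y', 'Z', '1', '2', '3', '4', '5', '6', '7', '8', '9'
--     ]
--
-- def _char_value(c):
--     # READABLE_CHARS is A..Z followed by 1..9, so the index is pure ord arithmetic.
--     o = ord(c)
--     if 65 <= o <= 90:      # 'A'..'Z' -> 0..25
--         return o - 65
--     if 49 <= o <= 57:      # '1'..'9' -> 26..34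
--         return o - 23
--     raise ValueError("%r is not in list" % c)
--
-- def code2id(code):
--     def go(s):
--         if not s:
--             return 0
--         return _char_value(s[0]) + 35 * go(s[1:])
--     return go(code.upper())
-- ===== Notes on version B (the rewrite author's own statement) =====
-- stated objective: alternative
-- what changed: Recursive big-endian-style decomposition value(head) + 35*rest over the upper-cased string, with the list scan READABLE_CHARS.index replaced by direct ord arithmetic (A..Z -> ord-65, 1..9 -> ord-23); no pos counter and no radix**pos power.
import Mathlib
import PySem

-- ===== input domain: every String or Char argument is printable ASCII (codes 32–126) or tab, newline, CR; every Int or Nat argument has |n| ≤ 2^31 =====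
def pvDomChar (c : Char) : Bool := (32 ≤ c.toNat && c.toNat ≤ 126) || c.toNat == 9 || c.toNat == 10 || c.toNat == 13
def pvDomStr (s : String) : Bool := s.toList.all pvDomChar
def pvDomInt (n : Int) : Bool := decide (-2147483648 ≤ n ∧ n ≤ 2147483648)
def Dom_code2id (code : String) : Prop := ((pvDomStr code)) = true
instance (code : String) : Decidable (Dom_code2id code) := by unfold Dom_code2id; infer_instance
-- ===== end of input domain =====

-- B: recursion value(head) + 35*rest over the upper-cased string, with ord arithmetic replacing
-- the list scan READABLE_CHARS.index; return values equal on Pre_ (both raise outside it).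

-- ===== PORT A =====
def READABLE : List Char :=
  ['A','B','C','D','E','F','G','H','I','J','K','L','M','N','O','P','Q','R','S','T',
   'U','V','W','X','Y','Z','1','2','3','4','5','6','7','8','9']

-- pos/result loop; READABLE.index c raises ValueError for absent chars (excluded by Pre_; getD 0 is unreachable there)
def code2id (code : String) : Int :=
  ((PySem.Str.upper code).toList.foldl
    (fun (st : Nat × Int) c =>
      (st.1 + 1, st.2 + (35 : Int) ^ st.1 * (((PySem.List.index? READABLE c).getD 0 : Nat) : Int)))
    (0, 0)).2

-- ===== PORT B =====
-- _char_value: ord arithmetic; the Python raise (unreachable under Pre_) is ported as the 0 default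
def charValue (c : Char) : Int :=
  if 65 ≤ c.toNat ∧ c.toNat ≤ 90 then (c.toNat : Int) - 65
  else if 49 ≤ c.toNat ∧ c.toNat ≤ 57 then (c.toNat : Int) - 23
  else 0

def code2idGo : List Char → Int
  | [] => 0
  | c :: rest => charValue c + 35 * code2idGo rest

def code2id_alt (code : String) : Int :=
  code2idGo (PySem.Str.upper code).toList

-- ===== PRECONDITION & SPEC =====
-- Pre_ excludes exactly the codes containing a character whose upper-case is not in READABLE_CHARS,
-- on which A (and B) raise ValueError.
def Pre_code2id (code : String) : Prop :=
  (code.toList.all (fun c => READABLE.contains (PySem.Chars.upperChar c))) = true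
instance (code : String) : Decidable (Pre_code2id code) := by unfold Pre_code2id; infer_instance
def pvWitness_code2id : String := "aZ9"

def Spec_code2id (code : String) (out : Int) : Prop := out = code2id_alt code
instance (code : String) (out : Int) : Decidable (Spec_code2id code out) := by unfold Spec_code2id; infer_instance

-- ===== CLAIM (what is proved, stated in full; the proofs are below) =====
def Claim_equal_code2id : Prop := ∀ (code : String), Dom_code2id code → Pre_code2id code → Spec_code2id code (code2id code)

-- ===== LEMMAS AND PROOFS =====
def idxVal (c : Char) : Int := (((PySem.List.index? READABLE c).getD 0 : Nat) : Int)

set_option maxRecDepth 8000 in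
theorem idxVal_eq_charValue : ∀ c ∈ READABLE, idxVal c = charValue c := by
  intro c hc
  fin_cases hc <;> rfl

theorem loop_eq (l : List Char) (h : ∀ c ∈ l, c ∈ READABLE) (p : Nat) (r : Int) :
    (l.foldl (fun (st : Nat × Int) c => (st.1 + 1, st.2 + (35 : Int) ^ st.1 * idxVal c)) (p, r)).2
    = r + (35 : Int) ^ p * code2idGo l := by
  induction l generalizing p r with
  | nil => simp [code2idGo]
  | cons c t ih =>
    simp only [List.foldl_cons, code2idGo,
      ih (fun x hx => h x (List.mem_cons_of_mem _ hx)),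
      idxVal_eq_charValue c (h c (List.mem_cons_self ..))]
    ring

-- ===== VERDICT (by name: the statement is the Claim_ definition above) =====
theorem code2id_spec : Claim_equal_code2id := by
  intro code _ hpre
  show code2id code = code2id_alt code
  unfold code2id code2id_alt
  have hmem : ∀ c ∈ (PySem.Str.upper code).toList, c ∈ READABLE := by
    intro c hc
    simp only [PySem.Str.toList_upper, PySem.Chars.upper, List.mem_map] at hc
    obtain ⟨d, hd, rfl⟩ := hc
    unfold Pre_code2id at hpre
    rw [List.all_eq_true] at hpre
    simpa [List.contains_iff_mem] using hpre d hd
  have := loop_eq (PySem.Str.upper code).toList hmem 0 0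
  simp only [idxVal] at this
  simpa using this
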